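-- pv_equiv track=rewrite | github.com/abryan-io/imb-scanner | intelligent_mail_barcode.py | binary_to_codewords
-- ===== SOURCE A (Python) =====
-- def binary_to_codewords(n):
--     r = []
--     n, x = divmod(n, 636)
--     r.append(x)
--     for i in range(9):
--         n, x = divmod(n, 1365)
--         r.append(x)
--     r.reverse()
--     return r
-- ===== SOURCE B (Python) =====
-- _WM = [(1, 636)] + [(636 * 1365 ** k, 1365) for k in range(9)]
--
-- def binary_to_codewords(n):
--     return [(n // w) % m for (w, m) in reversed(_WM)]
-- ===== Notes on version B (the rewrite author's own statement) =====
-- stated objective: alternative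
-- what changed: Replaces the sequential divmod chain with a running quotient and a final reverse by a precomputed weight/modulus table and ten independent digits (n // weight_k) % modulus_k emitted most-significant-first.
import Mathlib
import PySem

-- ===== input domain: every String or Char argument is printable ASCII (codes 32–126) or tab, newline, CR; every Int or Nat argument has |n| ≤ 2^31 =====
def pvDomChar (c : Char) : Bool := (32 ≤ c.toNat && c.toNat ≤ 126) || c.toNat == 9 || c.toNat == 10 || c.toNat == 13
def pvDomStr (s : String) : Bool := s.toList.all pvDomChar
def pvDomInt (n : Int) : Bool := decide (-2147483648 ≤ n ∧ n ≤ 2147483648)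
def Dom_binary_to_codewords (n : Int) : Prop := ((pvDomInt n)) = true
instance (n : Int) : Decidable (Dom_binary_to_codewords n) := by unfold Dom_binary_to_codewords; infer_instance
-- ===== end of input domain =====

-- B computes each IMB codeword independently as (n // weight_k) % modulus_k from a
-- precomputed weight/modulus table, emitted most-significant-first with no running
-- quotient and no final reverse (objective: alternative decomposition, same cost).

-- ===== PORT A =====
-- divmod with the nonzero literal divisors 636 and 1365: exact as floordiv/mod pairs.
def binary_to_codewords (n : Int) : List Int :=
  let n1 := PySem.Int.floordiv n 636
  let x1 := PySem.Int.mod n 636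
  let r : List Int := [x1]
  let st := (PySem.List.pyRange 0 9 1).foldl
    (fun (st : Int × List Int) _ =>
      (PySem.Int.floordiv st.1 1365, st.2 ++ [PySem.Int.mod st.1 1365]))
    (n1, r)
  st.2.reverse

-- ===== PORT B =====
-- the module-level table _WM = [(1, 636)] + [(636 * 1365**k, 1365) for k in range(9)]
def pvWM : List (Int × Int) :=
  [(1, 636)] ++ (PySem.List.pyRange 0 9 1).map (fun k => (636 * 1365 ^ k.toNat, 1365))

def binary_to_codewords_alt (n : Int) : List Int :=
  pvWM.reverse.map (fun wm => PySem.Int.mod (PySem.Int.floordiv n wm.1) wm.2)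

-- ===== PRECONDITION & SPEC =====
def Spec_binary_to_codewords (n : Int) (out : List Int) : Prop := out = binary_to_codewords_alt n
instance (n : Int) (out : List Int) : Decidable (Spec_binary_to_codewords n out) := by unfold Spec_binary_to_codewords; infer_instance

-- ===== CLAIM (what is proved, stated in full; the proofs are below) =====
def Claim_equal_binary_to_codewords : Prop := ∀ (n : Int), Dom_binary_to_codewords n → Spec_binary_to_codewords n (binary_to_codewords n)

-- ===== LEMMAS AND PROOFS =====

-- ===== VERDICT (by name: the statement is the Claim_ definition above) =====
theorem binary_to_codewords_spec : Claim_equal_binary_to_codewords := by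
  intro n _
  show binary_to_codewords n = binary_to_codewords_alt n
  simp only [binary_to_codewords, binary_to_codewords_alt, pvWM,
    show PySem.List.pyRange 0 9 1 = [0,1,2,3,4,5,6,7,8] from by decide,
    List.foldl, List.map, List.reverse, List.reverseAux, List.cons_append,
    List.nil_append]
  norm_num [Int.ediv_ediv_of_nonneg, show Int.toNat 2 = 2 from rfl, show Int.toNat 3 = 3 from rfl,
    show Int.toNat 4 = 4 from rfl, show Int.toNat 5 = 5 from rfl, show Int.toNat 6 = 6 from rfl,
    show Int.toNat 7 = 7 from rfl, show Int.toNat 8 = 8 from rfl]
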